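-- pv_equiv track=rewrite | github.com/p0ss/HatCatDev | scripts/analysis/analyze_custom_hierarchy.py | assign_layer
-- ===== SOURCE A (Python) =====
-- from typing import Dict, List, Set, Optional, Tuple
--
-- def assign_layer(
--     concept: str,
--     v4_layers: Dict[str, int],
--     concept_parents: Dict[str, str],
--     visited: Set[str] = None,
--     depth_cache: Dict[str, Optional[int]] = None
-- ) -> Optional[int]:
--     """
--     Recursively assign layer to a concept based on parent chain.
--
--     Returns:
--         Layer number (0-6) or None if undefined
--     """
--     if visited is None:
--         visited = set()
--     if depth_cache is None:
--         depth_cache = {}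
--
--     # Check cache first
--     if concept in depth_cache:
--         return depth_cache[concept]
--
--     # 1. If concept exists in V4, return its layer
--     if concept in v4_layers:
--         return v4_layers[concept]
--
--     # 2. Check for circular reference
--     if concept in visited:
--         return None  # Circular reference detected
--
--     visited.add(concept)
--
--     # 3. Find parent in custom hierarchy
--     parent = concept_parents.get(concept)
--     if not parent:
--         # No parent found - this is an issue
--         depth_cache[concept] = None
--         return None
--
--     # 4. Recursively get parent layer
--     parent_layer = assign_layer(parent, v4_layers, concept_parents, visited, depth_cache)
--
--     # 5. Child is one layer deeper than parent
--     if parent_layer is not None: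
--         child_layer = parent_layer + 1
--         # Cap at layer 6 (though we'll note overflow)
--         depth_cache[concept] = min(child_layer, 6)
--         return depth_cache[concept]
--     else:
--         depth_cache[concept] = None
--         return None
-- ===== SOURCE B (Python) =====
-- def assign_layer(concept, v4_layers, concept_parents, visited=None, depth_cache=None):
--     """Iterative chain walk + closed-form backfill: collect the fresh nodes of the
--     parent chain on `path` in one guarded while-loop, then cache/return
--     min(base + distance, 6) directly (the per-level min collapses to one cap).
--     Mutates `visited` and `depth_cache` identically to the recursive version."""
--     if visited is None:
--         visited = set()
--     if depth_cache is None: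
--         depth_cache = {}
--
--     path = []
--     node = concept
--     while node not in depth_cache and node not in v4_layers and node not in visited:
--         visited.add(node)
--         parent = concept_parents.get(node)
--         if not parent:
--             depth_cache[node] = None
--             for n in reversed(path):
--                 depth_cache[n] = None
--             return None
--         path.append(node)
--         node = parent
--
--     if node in depth_cache:
--         base = depth_cache[node]
--     elif node in v4_layers:
--         base = v4_layers[node]
--     else:
--         base = None  # cycle detected
--
--     if base is None:
--         for n in reversed(path):
--             depth_cache[n] = None
--         return None
--
--     for i, n in enumerate(reversed(path), start=1):
--         depth_cache[n] = min(base + i, 6)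
--     return base if not path else min(base + len(path), 6)
-- ===== Notes on version B (the rewrite author's own statement) =====
-- stated objective: alternative
-- what changed: Replaced A's recursive per-node unwinding by a single guarded while-loop that collects the fresh parent-chain nodes on a list, followed by a closed-form backfill depth_cache[n] = min(base + distance, 6) (the per-level min of the recursion collapses to one cap), eliminating recursion entirely.
import Mathlib
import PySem

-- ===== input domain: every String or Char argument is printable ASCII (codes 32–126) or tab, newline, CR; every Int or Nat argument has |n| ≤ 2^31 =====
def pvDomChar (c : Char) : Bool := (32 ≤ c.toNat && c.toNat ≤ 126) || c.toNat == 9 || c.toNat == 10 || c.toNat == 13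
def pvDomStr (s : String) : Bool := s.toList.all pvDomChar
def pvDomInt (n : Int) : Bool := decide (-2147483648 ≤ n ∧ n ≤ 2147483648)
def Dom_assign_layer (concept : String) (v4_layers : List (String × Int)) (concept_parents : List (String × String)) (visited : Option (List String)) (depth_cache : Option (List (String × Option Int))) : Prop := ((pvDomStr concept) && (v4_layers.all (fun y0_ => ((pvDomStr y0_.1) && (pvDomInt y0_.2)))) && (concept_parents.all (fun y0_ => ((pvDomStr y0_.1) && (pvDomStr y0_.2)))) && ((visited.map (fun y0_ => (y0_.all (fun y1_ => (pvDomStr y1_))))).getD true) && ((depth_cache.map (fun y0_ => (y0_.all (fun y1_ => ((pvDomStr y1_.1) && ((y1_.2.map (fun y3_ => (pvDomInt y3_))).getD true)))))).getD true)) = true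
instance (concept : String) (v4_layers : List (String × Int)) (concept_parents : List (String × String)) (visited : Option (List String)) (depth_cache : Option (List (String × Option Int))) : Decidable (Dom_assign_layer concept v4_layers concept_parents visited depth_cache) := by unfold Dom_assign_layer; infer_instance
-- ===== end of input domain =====

-- B replaces A's recursion by one guarded while-loop collecting the chain on a
-- list plus a closed-form cache backfill min(base+distance,6) (alternative
-- decomposition, no recursion). Both Pythons mutate visited/depth_cache
-- identically; the equivalence proved here is about the RETURN value.

-- ===== PORT A =====
-- Termination measure shared by both ports: entries of the parent dict whose key
-- is not yet visited.
def pvMeasure (parents : PySem.Dict String String) (vis : List String) : Nat :=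
  (parents.items.filter (fun q => !(PySem.Set.contains vis q.1))).length

lemma pvFilter_snoc_lt (l : List (String × String)) (vis : List String) (c : String)
    (hc : vis.contains c = false) (hm : ∃ x, (c, x) ∈ l) :
    (l.filter (fun q => !((vis ++ [c]).contains q.1))).length <
      (l.filter (fun q => !(vis.contains q.1))).length := by
  simp only [← List.countP_eq_length_filter]
  induction l with
  | nil => obtain ⟨x, hx⟩ := hm; simp at hx
  | cons q t ih =>
    obtain ⟨x, hx⟩ := hm
    have hmono : t.countP (fun q => !((vis ++ [c]).contains q.1)) ≤
        t.countP (fun q => !(vis.contains q.1)) := by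
      apply List.countP_mono_left
      intro a _ ha
      simp only [List.contains_append, Bool.not_eq_eq_eq_not, Bool.not_true,
        Bool.or_eq_false_iff] at ha ⊢
      exact ha.1
    by_cases hq : q.1 = c
    · have h1 : ((vis ++ [c]).contains q.1) = true := by
        have : c ∈ ([c] : List String) := List.mem_singleton_self c
        simp [hq, List.contains_eq_mem]
      have h2 : (vis.contains q.1) = false := by rw [hq]; exact hc
      rw [List.countP_cons, List.countP_cons]
      simp only [h1, h2, Bool.not_true, Bool.not_false]
      simpa using Nat.lt_succ_of_le hmono
    · have hmem : ∃ x, (c, x) ∈ t := by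
        rcases List.mem_cons.mp hx with h | h
        · exact absurd (congrArg Prod.fst h.symm) hq
        · exact ⟨x, h⟩
      have hsame : ((vis ++ [c]).contains q.1) = (vis.contains q.1) := by
        simp only [List.contains_append]
        have h0 : ([c].contains q.1) = false := by
          simp only [List.contains_eq_mem, List.mem_singleton, decide_eq_false_iff_not]
          exact hq
        rw [h0, Bool.or_false]
      rw [List.countP_cons, List.countP_cons, hsame]
      have := ih hmem
      omega

lemma pvMeasure_lt (parents : PySem.Dict String String) (vis : List String) (c p : String)
    (hvis : PySem.Set.contains vis c = false) (hp : parents.get? c = some p) :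
    pvMeasure parents (PySem.Set.add vis c) < pvMeasure parents vis := by
  have hadd : PySem.Set.add vis c = vis ++ [c] := by
    simp [PySem.Set.add, PySem.Set.contains] at hvis ⊢
    simp [hvis]
  have hmem : (c, p) ∈ parents.items := PySem.Dict.mem_items_of_get?_eq_some parents hp
  unfold pvMeasure
  rw [hadd]
  exact pvFilter_snoc_lt parents.items vis c (by simpa [PySem.Set.contains] using hvis) ⟨p, hmem⟩

-- Literal port of A's recursion (state `visited`/`depth_cache` threaded explicitly).
def assignARec (v4 : PySem.Dict String Int) (parents : PySem.Dict String String)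
    (concept : String) (vis : PySem.Set String) (cache : PySem.Dict String (Option Int)) :
    Option Int × PySem.Set String × PySem.Dict String (Option Int) :=
  match cache.get? concept with
  | some v => (v, vis, cache)
  | none =>
    match v4.get? concept with
    | some l => (some l, vis, cache)
    | none =>
      if hv : PySem.Set.contains vis concept then (none, vis, cache)
      else
        let vis' := PySem.Set.add vis concept
        match hp : parents.get? concept with
        | none => (none, vis', cache.insert concept none)
        | some p =>
          if p = "" then (none, vis', cache.insert concept none)
          else
            let r := assignARec v4 parents p vis' cache
            match r.1 with
            | some pl =>
              let v := min (pl + 1) 6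
              (some v, r.2.1, r.2.2.insert concept (some v))
            | none => (none, r.2.1, r.2.2.insert concept none)
termination_by pvMeasure parents vis
decreasing_by
  exact pvMeasure_lt parents vis concept p (by simpa using hv) hp

def assign_layer (concept : String) (v4_layers : List (String × Int)) (concept_parents : List (String × String)) (visited : Option (List String)) (depth_cache : Option (List (String × Option Int))) : Option Int :=
  (assignARec (PySem.Dict.mk v4_layers) (PySem.Dict.mk concept_parents) concept
    (visited.getD []) (PySem.Dict.mk (depth_cache.getD []))).1

-- ===== PORT B =====
-- Source B's while-loop: walk up while the node is fresh, collecting the chain on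
-- `path`; `none` is the loop's early `return None` (orphan node: `not parent`).
-- The cache writes of Source B all happen after the return value is determined and
-- never feed back into it, so this return-value port does not thread them.
def chainWalk (v4 : PySem.Dict String Int) (parents : PySem.Dict String String)
    (cache : PySem.Dict String (Option Int)) (node : String) (path : List String)
    (vis : PySem.Set String) : Option (String × List String) :=
  if h : (cache.get? node).isSome || (v4.get? node).isSome || PySem.Set.contains vis node then
    some (node, path)
  else
    let vis' := PySem.Set.add vis node
    match hp : parents.get? node with
    | none => none
    | some p => if p = "" then none else chainWalk v4 parents cache p (path ++ [node]) vis'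
termination_by pvMeasure parents vis
decreasing_by
  exact pvMeasure_lt parents vis node p
    (by simp only [Bool.or_eq_true, not_or, Bool.not_eq_true] at h; exact h.2) hp

-- the `base` computed after Source B's loop exits
def baseOf (v4 : PySem.Dict String Int) (cache : PySem.Dict String (Option Int))
    (node : String) : Option Int :=
  match cache.get? node with
  | some v => v
  | none =>
    match v4.get? node with
    | some l => some l
    | none => none

def assign_layer_alt (concept : String) (v4_layers : List (String × Int)) (concept_parents : List (String × String)) (visited : Option (List String)) (depth_cache : Option (List (String × Option Int))) : Option Int :=
  let v4 := PySem.Dict.mk v4_layers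
  let cache := PySem.Dict.mk (depth_cache.getD [])
  match chainWalk v4 (PySem.Dict.mk concept_parents) cache concept [] (visited.getD []) with
  | none => none
  | some (node, path) =>
    match baseOf v4 cache node with
    | none => none
    | some b => if path.isEmpty then some b else some (min (b + (path.length : Int)) 6)
-- ===== PRECONDITION & SPEC =====
def Spec_assign_layer (concept : String) (v4_layers : List (String × Int)) (concept_parents : List (String × String)) (visited : Option (List String)) (depth_cache : Option (List (String × Option Int))) (out : Option Int) : Prop := out = assign_layer_alt concept v4_layers concept_parents visited depth_cache
instance (concept : String) (v4_layers : List (String × Int)) (concept_parents : List (String × String)) (visited : Option (List String)) (depth_cache : Option (List (String × Option Int))) (out : Option Int) : Decidable (Spec_assign_layer concept v4_layers concept_parents visited depth_cache out) := by unfold Spec_assign_layer; infer_instance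

-- ===== CLAIM (what is proved, stated in full; the proofs are below) =====
def Claim_equal_assign_layer : Prop := ∀ (concept : String) (v4_layers : List (String × Int)) (concept_parents : List (String × String)) (visited : Option (List String)) (depth_cache : Option (List (String × Option Int))), Dom_assign_layer concept v4_layers concept_parents visited depth_cache → Spec_assign_layer concept v4_layers concept_parents visited depth_cache (assign_layer concept v4_layers concept_parents visited depth_cache)

-- ===== LEMMAS AND PROOFS =====

-- Source B's code after the while-loop, as a function of the loop's outcome.
def pvFinish (v4 : PySem.Dict String Int) (cache : PySem.Dict String (Option Int)) :
    Option (String × List String) → Option Int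
  | none => none
  | some (node, path) =>
    match baseOf v4 cache node with
    | none => none
    | some b => if path.isEmpty then some b else some (min (b + (path.length : Int)) 6)

-- The walk with accumulator `path` is the walk with empty accumulator, prefixed.
lemma chainWalk_path (v4 : PySem.Dict String Int) (parents : PySem.Dict String String)
    (cache : PySem.Dict String (Option Int)) :
    ∀ n (c : String) (path : List String) (vis : PySem.Set String),
      pvMeasure parents vis ≤ n →
      chainWalk v4 parents cache c path vis =
        (chainWalk v4 parents cache c [] vis).map (fun r => (r.1, path ++ r.2)) := by
  intro n
  induction n using Nat.strong_induction_on with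
  | _ n ih =>
  intro c path vis hn
  rw [chainWalk, chainWalk]
  by_cases hc : ((cache.get? c).isSome || (v4.get? c).isSome || PySem.Set.contains vis c) = true
  · rw [dif_pos hc, dif_pos hc]; simp
  · rw [dif_neg hc, dif_neg hc]
    cases hpp : parents.get? c with
    | none => simp
    | some p =>
    by_cases hpe : p = ""
    · simp [hpe]
    · simp only [hpe, if_false]
      have hm' : pvMeasure parents (PySem.Set.add vis c) < n := by
        refine lt_of_lt_of_le (pvMeasure_lt parents vis c p ?_ hpp) hn
        simp only [Bool.or_eq_true, not_or, Bool.not_eq_true] at hc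
        exact hc.2
      rw [ih _ hm' p (path ++ [c]) _ le_rfl, ih _ hm' p ([] ++ [c]) _ le_rfl]
      cases chainWalk v4 parents cache p [] (PySem.Set.add vis c) with
      | none => simp
      | some r => simp

-- Main bridge: A's recursion computes B's walk followed by the closed form.
lemma assignARec_eq_finish (v4 : PySem.Dict String Int) (parents : PySem.Dict String String)
    (cache : PySem.Dict String (Option Int)) :
    ∀ n (c : String) (vis : PySem.Set String), pvMeasure parents vis ≤ n →
      (assignARec v4 parents c vis cache).1 =
        pvFinish v4 cache (chainWalk v4 parents cache c [] vis) := by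
  intro n
  induction n using Nat.strong_induction_on with
  | _ n ih =>
  intro c vis hn
  rw [assignARec, chainWalk]
  cases hcc : cache.get? c with
  | some v => cases v <;> simp [pvFinish, baseOf, hcc]
  | none =>
  cases hvv : v4.get? c with
  | some l => simp [pvFinish, baseOf, hcc, hvv]
  | none =>
  by_cases hv : PySem.Set.contains vis c = true
  · have hmem : c ∈ vis := by simpa using hv
    simp [pvFinish, baseOf, hmem, hcc, hvv]
  · have hnm : c ∉ vis := by simpa using hv
    rw [dif_neg hv,
      dif_neg (show ¬ (((none : Option (Option Int)).isSome ||
        (none : Option Int).isSome || PySem.Set.contains vis c) = true) by simp [hnm])]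
    cases hpp : parents.get? c with
    | none => simp [pvFinish]
    | some p =>
    by_cases hpe : p = ""
    · simp [hpe, pvFinish]
    · simp only [hpe, if_false]
      have hm' : pvMeasure parents (PySem.Set.add vis c) < n :=
        lt_of_lt_of_le (pvMeasure_lt parents vis c p (by simpa using hv) hpp) hn
      have hIH := ih _ hm' p (PySem.Set.add vis c) le_rfl
      rw [chainWalk_path v4 parents cache (pvMeasure parents (PySem.Set.add vis c))
        p ([] ++ [c]) _ le_rfl]
      cases hw : chainWalk v4 parents cache p [] (PySem.Set.add vis c) with
      | none =>
        rw [hw] at hIH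
        simp only [pvFinish] at hIH
        simp [hIH, pvFinish]
      | some r =>
        obtain ⟨node, pa⟩ := r
        rw [hw] at hIH
        cases hb : baseOf v4 cache node with
        | none =>
          simp only [pvFinish, hb] at hIH
          simp [hIH, pvFinish, hb]
        | some b =>
          simp only [pvFinish, hb] at hIH
          cases pa with
          | nil =>
            simp only [List.isEmpty_nil, if_true] at hIH
            simp [hIH, pvFinish, hb]
          | cons x xs =>
            simp only [List.isEmpty_cons, if_false, Bool.false_eq_true] at hIH
            simp [hIH, pvFinish, hb]
            omega

-- ===== VERDICT (by name: the statement is the Claim_ definition above) =====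
theorem assign_layer_spec : Claim_equal_assign_layer := by
  intro concept v4_layers concept_parents visited depth_cache _
  unfold Spec_assign_layer assign_layer assign_layer_alt
  rw [assignARec_eq_finish _ _ _ (pvMeasure (PySem.Dict.mk concept_parents) (visited.getD [])) _ _ le_rfl]
  rfl
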